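-- pv_equiv track=rewrite | github.com/Garfieldttt/podman-kube-generator | generator/compose.py | _split_caps
-- ===== SOURCE A (Python) =====
-- def _parse_lines(raw):
--     return [l.strip() for l in (raw or '').splitlines() if l.strip()]
--
-- def _split_caps(raw):
--     caps = []
--     for line in _parse_lines(raw):
--         for cap in line.split(','):
--             cap = cap.strip()
--             if cap:
--                 caps.append(cap)
--     return caps
-- ===== SOURCE B (Python) =====
-- def _split_caps(raw):
--     # Single left-to-right character scan: flush the accumulated token at every
--     # separator (',' or a line break) instead of splitlines + per-line split(',').
--     caps = []
--     cur = []
--     for ch in (raw or ''):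
--         if ch in ',\n\r':
--             tok = ''.join(cur).strip()
--             if tok:
--                 caps.append(tok)
--             cur = []
--         else:
--             cur.append(ch)
--     tok = ''.join(cur).strip()
--     if tok:
--         caps.append(tok)
--     return caps
-- ===== Notes on version B (the rewrite author's own statement) =====
-- stated objective: alternative
-- what changed: Replaces the nested splitlines + per-line split-on-comma + strip passes (and the _parse_lines helper) with one left-to-right character scan that accumulates the current token and flushes it, stripped and if non-empty, at each separator character (comma or line break).
import Mathlib
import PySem

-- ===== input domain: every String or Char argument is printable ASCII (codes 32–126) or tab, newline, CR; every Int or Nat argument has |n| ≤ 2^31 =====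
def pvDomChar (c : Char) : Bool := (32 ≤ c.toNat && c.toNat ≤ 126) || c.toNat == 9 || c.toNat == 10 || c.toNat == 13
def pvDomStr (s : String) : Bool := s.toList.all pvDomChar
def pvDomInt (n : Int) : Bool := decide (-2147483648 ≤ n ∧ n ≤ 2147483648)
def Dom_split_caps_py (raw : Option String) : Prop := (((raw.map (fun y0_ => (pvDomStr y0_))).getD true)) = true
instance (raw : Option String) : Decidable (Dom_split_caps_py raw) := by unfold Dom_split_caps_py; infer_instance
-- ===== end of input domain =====

-- B replaces A's nested splitlines + per-line split(',') + strip passes with a single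
-- left-to-right character scan that flushes the current token at each separator (alternative decomposition, same cost).


-- ===== PORT A =====
-- _parse_lines: [l.strip() for l in (raw or '').splitlines() if l.strip()]
-- (the comprehension evaluates l.strip() twice: once as the filter, once as the element)
def pvParseLines (raw : Option String) : List String :=
  (PySem.Str.splitlines (raw.getD "")).filterMap
    (fun l => if PySem.Str.strip l ≠ "" then some (PySem.Str.strip l) else none)

-- line.split(',') has a literal non-empty separator, so PySem.Chars.splitOn is exact here.
def split_caps_py (raw : Option String) : List String :=
  (pvParseLines raw).foldl
    (fun caps line =>
      ((PySem.Chars.splitOn line.toList [',']).map String.ofList).foldl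
        (fun caps cap =>
          let cap := PySem.Str.strip cap
          if cap ≠ "" then caps ++ [cap] else caps)
        caps)
    []

-- ===== PORT B =====
def pvFlushTok (cur : List Char) (caps : List String) : List String :=
  let tok := PySem.Chars.strip cur
  if tok ≠ [] then caps ++ [String.ofList tok] else caps

def pvScan : List Char → List Char → List String → List String
  | [], cur, caps => pvFlushTok cur caps
  | c :: rest, cur, caps =>
    if c = ',' ∨ c = '\n' ∨ c = '\r' then pvScan rest [] (pvFlushTok cur caps)
    else pvScan rest (cur ++ [c]) caps

def split_caps_py_alt (raw : Option String) : List String :=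
  pvScan (raw.getD "").toList [] []

-- ===== PRECONDITION & SPEC =====
def Spec_split_caps_py (raw : Option String) (out : List String) : Prop := out = split_caps_py_alt raw
instance (raw : Option String) (out : List String) : Decidable (Spec_split_caps_py raw out) := by unfold Spec_split_caps_py; infer_instance

-- ===== CLAIM (what is proved, stated in full; the proofs are below) =====
def Claim_equal_split_caps_py : Prop := ∀ (raw : Option String), Dom_split_caps_py raw → Spec_split_caps_py raw (split_caps_py raw)

-- ===== LEMMAS AND PROOFS =====

-- the line-boundary predicate inside PySem.Chars.splitlines
def pvIsB (c : Char) : Bool :=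
  decide (c.toNat = 10) || decide (c.toNat = 13) || decide (c.toNat = 11) || decide (c.toNat = 12) ||
  decide (c.toNat = 28) || decide (c.toNat = 29) || decide (c.toNat = 30) || decide (c.toNat = 133) ||
  decide (c.toNat = 8232) || decide (c.toNat = 8233)

def pvConsH (c : Char) : List (List Char) → List (List Char)
  | [] => [[c]]
  | x :: xs => (c :: x) :: xs

-- clean recursion computing PySem.Chars.splitlines (parameterised by the boundary test)
def pvLinesOf (isB : Char → Bool) : List Char → List (List Char)
  | [] => []
  | '\r' :: '\n' :: r => [] :: pvLinesOf isB r
  | c :: r => if isB c then [] :: pvLinesOf isB r else pvConsH c (pvLinesOf isB r)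

-- clean recursion computing PySem.Chars.splitOn · [',']
def pvSOC : List Char → List (List Char)
  | [] => [[]]
  | c :: r => if c = ',' then [] :: pvSOC r else pvConsH c (pvSOC r)

def pvPrepH (p : List Char) : List (List Char) → List (List Char)
  | [] => [p]
  | x :: xs => (p ++ x) :: xs

def pvH (p : List Char) : List (List Char) → List (List Char)
  | [] => if p = [] then [] else [p]
  | x :: xs => (p ++ x) :: xs

def pvSnocLast (c : Char) : List (List Char) → List (List Char)
  | [] => [[c]]
  | [x] => [x ++ [c]]
  | x :: xs => x :: pvSnocLast c xs

-- stripped non-empty pieces, as Strings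
def pvTokens (ps : List (List Char)) : List String :=
  ((ps.map PySem.Chars.strip).filter (fun t => t ≠ [])).map String.ofList

theorem pvConsH_ne_nil (c : Char) (ls : List (List Char)) : pvConsH c ls ≠ [] := by
  cases ls <;> simp [pvConsH]

theorem pvSOC_ne_nil (l : List Char) : pvSOC l ≠ [] := by
  cases l with
  | nil => simp [pvSOC]
  | cons c r =>
    simp only [pvSOC]
    split
    · simp
    · exact pvConsH_ne_nil _ _

theorem go_cons (isB : Char → Bool) (c : Char) (r cur acc)
    (h : ∀ r', c = '\r' → r = '\n' :: r' → False) :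
    PySem.Chars.splitlines.go isB (c :: r) cur acc =
      if isB c then PySem.Chars.splitlines.go isB r [] (cur.reverse :: acc)
      else PySem.Chars.splitlines.go isB r (c :: cur) acc := by
  rw [PySem.Chars.splitlines.go.eq_def]
  split
  · rename_i heq; cases heq
  · rename_i rest heq
    injection heq with e1 e2
    exact (h rest e1 e2).elim
  · rename_i h2
    injection h2 with e1 e2
    subst e1; subst e2
    rfl

theorem go_nil (isB : Char → Bool) (cur acc) :
    PySem.Chars.splitlines.go isB [] cur acc =
      if cur.isEmpty then acc.reverse else (cur.reverse :: acc).reverse := by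
  rfl

theorem go_rn (isB : Char → Bool) (r cur acc) :
    PySem.Chars.splitlines.go isB ('\r' :: '\n' :: r) cur acc =
      PySem.Chars.splitlines.go isB r [] (cur.reverse :: acc) := by
  rfl

theorem splitlines_go_eq (isB : Char → Bool) (l cur acc) :
    PySem.Chars.splitlines.go isB l cur acc = acc.reverse ++ pvH cur.reverse (pvLinesOf isB l) := by
  fun_induction pvLinesOf isB l generalizing cur acc with
  | case1 =>
    rw [go_nil]
    split <;> simp_all [pvH]
  | case2 r ih =>
    rw [go_rn, ih]
    cases h : pvLinesOf isB r <;> simp_all [pvH]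
  | case3 c r hne hb ih =>
    rw [go_cons _ _ _ _ _ hne]
    simp only [hb, if_true, ih]
    cases h : pvLinesOf isB r <;> simp_all [pvH]
  | case4 c r hne hb ih =>
    rw [go_cons _ _ _ _ _ hne]
    simp only [hb, ih, if_false, Bool.false_eq_true]
    cases h : pvLinesOf isB r <;> simp_all [pvH, pvConsH]

theorem splitlines_eq (isB : Char → Bool) (s : List Char) :
    PySem.Chars.splitlines.go isB s [] [] = pvLinesOf isB s := by
  rw [splitlines_go_eq]
  cases h : pvLinesOf isB s <;> simp [pvH]

theorem splitOn_go_eq (l : List Char) : ∀ (fuel : Nat) (cur : List Char) (acc : List (List Char)),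
    l.length < fuel →
    PySem.Chars.splitOn.go [','] fuel l cur acc = acc.reverse ++ pvPrepH cur.reverse (pvSOC l) := by
  induction l with
  | nil =>
    intro fuel cur acc h
    match fuel, h with
    | fuel+1, _ =>
      simp [PySem.Chars.splitOn.go, pvSOC, pvPrepH]
  | cons c r ih =>
    intro fuel cur acc h
    match fuel, h with
    | fuel+1, _ =>
      rw [PySem.Chars.splitOn.go.eq_def]
      simp only []
      by_cases hc : c = ','
      · subst hc
        have hp : [','].isPrefixOf (',' :: r) = true := by simp [List.isPrefixOf]
        simp only [hp, if_true, List.length_cons, List.length_nil, List.drop] at *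
        rw [ih fuel [] (cur.reverse :: acc) (by omega)]
        simp [pvSOC, pvPrepH]
        cases hs : pvSOC r with
        | nil => exact absurd hs (pvSOC_ne_nil r)
        | cons x xs => simp [pvPrepH]
      · have hp : [','].isPrefixOf (c :: r) = false := by simp [List.isPrefixOf, Ne.symm hc]
        simp only [hp, Bool.false_eq_true, if_false, List.length_cons] at *
        rw [ih fuel (c :: cur) acc (by omega)]
        simp only [pvSOC, hc, if_false, List.reverse_cons]
        cases hs : pvSOC r with
        | nil => exact absurd hs (pvSOC_ne_nil r)
        | cons x xs => simp [pvPrepH, pvConsH]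

theorem splitOn_comma_eq (s : List Char) :
    PySem.Chars.splitOn s [','] = pvPrepH [] (pvSOC s) := by
  rw [PySem.Chars.splitOn, splitOn_go_eq s (s.length+1) [] [] (by omega)]
  simp

theorem pvTokens_append (ps qs : List (List Char)) : pvTokens (ps ++ qs) = pvTokens ps ++ pvTokens qs := by
  simp [pvTokens]

theorem pvTokens_cons (p : List Char) (ps : List (List Char)) :
    pvTokens (p :: ps) = pvTokens [p] ++ pvTokens ps := by
  simpa using pvTokens_append [p] ps

theorem pvTokens_nil_piece : pvTokens [([] : List Char)] = [] := by
  simp [pvTokens, PySem.Chars.strip, PySem.Chars.lstrip, PySem.Chars.rstrip]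

theorem pvTokens_prepH_nil (ps : List (List Char)) : pvTokens (pvPrepH [] ps) = pvTokens ps := by
  cases ps with
  | nil => simpa [pvPrepH] using pvTokens_nil_piece
  | cons x xs => simp [pvPrepH]

theorem pvFlushTok_eq (cur : List Char) (caps : List String) :
    pvFlushTok cur caps = caps ++ pvTokens [cur] := by
  simp only [pvFlushTok, pvTokens, List.map, List.filter]
  split <;> simp_all

theorem pvFlushTok_nil (caps : List String) : pvFlushTok [] caps = caps := by
  rw [pvFlushTok_eq, pvTokens_nil_piece, List.append_nil]

theorem strip_cons_ws (c : Char) (x : List Char) (h : PySem.Chars.isspace c = true) :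
    PySem.Chars.strip (c :: x) = PySem.Chars.strip x := by
  simp [PySem.Chars.strip, PySem.Chars.lstrip, h]

theorem strip_snoc_ws (c : Char) (x : List Char) (h : PySem.Chars.isspace c = true) :
    PySem.Chars.strip (x ++ [c]) = PySem.Chars.strip x := by
  simp only [PySem.Chars.strip, PySem.Chars.lstrip, PySem.Chars.rstrip, List.dropWhile_append]
  split
  · rename_i hh
    simp only [List.isEmpty_iff] at hh
    simp [List.dropWhile_cons, h, hh]
  · rename_i hh
    simp [List.dropWhile_cons, h]

theorem ws_ne_comma (c : Char) (h : PySem.Chars.isspace c = true) : c ≠ ',' := by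
  intro e; subst e; simp [PySem.Chars.isspace] at h

theorem map_strip_pvSnocLast (c : Char) (ls : List (List Char)) (h : PySem.Chars.isspace c = true) :
    ls ≠ [] → (pvSnocLast c ls).map PySem.Chars.strip = ls.map PySem.Chars.strip := by
  induction ls with
  | nil => intro hne; exact absurd rfl hne
  | cons x xs ih =>
    intro _
    cases xs with
    | nil => simp [pvSnocLast, strip_snoc_ws c x h]
    | cons y ys => simp [pvSnocLast, ih (by simp)]

theorem pvConsH_snocLast (a c : Char) (ls : List (List Char)) :
    pvConsH a (pvSnocLast c ls) = pvSnocLast c (pvConsH a ls) := by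
  cases ls with
  | nil => simp [pvSnocLast, pvConsH]
  | cons x xs =>
    cases xs with
    | nil => simp [pvSnocLast, pvConsH]
    | cons y ys => simp [pvSnocLast, pvConsH]

theorem pvSOC_snoc (c : Char) (x : List Char) (h : c ≠ ',') :
    pvSOC (x ++ [c]) = pvSnocLast c (pvSOC x) := by
  induction x with
  | nil => simp [pvSOC, h, pvConsH, pvSnocLast]
  | cons a r ih =>
    by_cases ha : a = ','
    · subst ha
      simp only [List.cons_append, pvSOC, if_true, ih]
      cases hs : pvSOC r with
      | nil => exact absurd hs (pvSOC_ne_nil r)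
      | cons y ys => simp [pvSnocLast]
    · simp [pvSOC, ha, ih, pvConsH_snocLast]

theorem map_strip_pvSOC_lstrip (x : List Char) :
    (pvSOC (PySem.Chars.lstrip x)).map PySem.Chars.strip = (pvSOC x).map PySem.Chars.strip := by
  induction x with
  | nil => rfl
  | cons c r ih =>
    by_cases hws : PySem.Chars.isspace c = true
    · rw [show PySem.Chars.lstrip (c :: r) = PySem.Chars.lstrip r by
        simp [PySem.Chars.lstrip, hws]]
      rw [ih]
      simp only [pvSOC, ws_ne_comma c hws, if_false]
      cases hs : pvSOC r with
      | nil => exact absurd hs (pvSOC_ne_nil r)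
      | cons y ys => simp [pvConsH, strip_cons_ws c y hws]
    · rw [show PySem.Chars.lstrip (c :: r) = c :: r by
        simp [PySem.Chars.lstrip, List.dropWhile_cons, hws]]

theorem map_strip_pvSOC_rstrip (x : List Char) :
    (pvSOC (PySem.Chars.rstrip x)).map PySem.Chars.strip = (pvSOC x).map PySem.Chars.strip := by
  induction x using List.reverseRecOn with
  | nil => rfl
  | append_singleton r c ih =>
    by_cases hws : PySem.Chars.isspace c = true
    · rw [show PySem.Chars.rstrip (r ++ [c]) = PySem.Chars.rstrip r by
        simp [PySem.Chars.rstrip, hws]]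
      rw [ih, pvSOC_snoc c r (ws_ne_comma c hws),
        map_strip_pvSnocLast c _ hws (pvSOC_ne_nil r)]
    · rw [show PySem.Chars.rstrip (r ++ [c]) = r ++ [c] by
        simp [PySem.Chars.rstrip, List.dropWhile_cons, hws]]

theorem pvTokens_pvSOC_strip (x : List Char) :
    pvTokens (pvSOC (PySem.Chars.strip x)) = pvTokens (pvSOC x) := by
  have h1 : (pvSOC (PySem.Chars.strip x)).map PySem.Chars.strip = (pvSOC x).map PySem.Chars.strip := by
    rw [PySem.Chars.strip, map_strip_pvSOC_rstrip, map_strip_pvSOC_lstrip]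
  simp only [pvTokens, ← List.filter_map, h1]

theorem pvTokens_pvSOC_blank (x : List Char) (h : PySem.Chars.strip x = []) :
    pvTokens (pvSOC x) = [] := by
  rw [← pvTokens_pvSOC_strip, h]
  rfl

theorem flatMap_consH (c : Char) (ls : List (List Char)) (h : c ≠ ',') :
    (pvConsH c ls).flatMap pvSOC = pvConsH c (ls.flatMap pvSOC) := by
  cases ls with
  | nil => simp [pvConsH, pvSOC, h]
  | cons x xs =>
    simp only [pvConsH, List.flatMap_cons, pvSOC, h, if_false]
    cases hs : pvSOC x with
    | nil => exact absurd hs (pvSOC_ne_nil x)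
    | cons y ys => simp [pvConsH]

theorem prepH_consH (cur : List Char) (c : Char) (ps : List (List Char)) :
    pvPrepH cur (pvConsH c ps) = pvPrepH (cur ++ [c]) ps := by
  cases ps <;> simp [pvPrepH, pvConsH]

theorem flatMap_comma (ls : List (List Char)) (cur : List Char) :
    pvTokens (pvPrepH cur ((pvConsH ',' ls).flatMap pvSOC)) =
      pvTokens [cur] ++ pvTokens (ls.flatMap pvSOC) := by
  cases ls with
  | nil =>
    have h1 : (pvConsH ',' []).flatMap pvSOC = [[], []] := by simp [pvConsH, pvSOC]
    rw [h1]
    simp only [pvPrepH, List.append_nil]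
    rw [pvTokens_cons, pvTokens_cons, pvTokens_nil_piece]
    simp [pvTokens]
  | cons x xs =>
    have h1 : (pvConsH ',' (x :: xs)).flatMap pvSOC = [] :: ((x :: xs).flatMap pvSOC) := by
      simp [pvConsH, pvSOC]
    rw [h1]
    simp only [pvPrepH, List.append_nil]
    rw [pvTokens_cons]

theorem dom_isB (c : Char) (hd : pvDomChar c = true) (hb : pvIsB c = true) : c = '\n' ∨ c = '\r' := by
  simp only [pvDomChar, pvIsB, Bool.or_eq_true, Bool.and_eq_true, decide_eq_true_eq, beq_iff_eq] at hd hb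
  have : c.toNat = 10 ∨ c.toNat = 13 := by omega
  rcases this with h | h
  · left; exact Char.ext (UInt32.toNat_inj.mp h)
  · right; exact Char.ext (UInt32.toNat_inj.mp h)

theorem isB_n : pvIsB '\n' = true := by decide
theorem isB_r : pvIsB '\r' = true := by decide

theorem main_scan (l : List Char) : ∀ cur caps, (∀ c ∈ l, pvDomChar c = true) →
    pvScan l cur caps = caps ++ pvTokens (pvPrepH cur ((pvLinesOf pvIsB l).flatMap pvSOC)) := by
  fun_induction pvLinesOf pvIsB l with
  | case1 =>
    intro cur caps _
    simp [pvScan, pvFlushTok_eq, pvPrepH]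
  | case2 r ih =>
    intro cur caps hd
    have hdr : ∀ c ∈ r, pvDomChar c = true := by
      intro c hc; exact hd c (by simp [hc])
    have e1 : pvScan ('\r' :: '\n' :: r) cur caps = pvScan r [] (pvFlushTok cur caps) := by
      simp [pvScan, pvFlushTok_nil]
    rw [e1, ih [] (pvFlushTok cur caps) hdr, pvFlushTok_eq]
    have h2 : ([] :: pvLinesOf pvIsB r).flatMap pvSOC = [] :: ((pvLinesOf pvIsB r).flatMap pvSOC) := by
      simp [pvSOC]
    rw [h2, show pvPrepH cur ([] :: ((pvLinesOf pvIsB r).flatMap pvSOC)) =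
        cur :: ((pvLinesOf pvIsB r).flatMap pvSOC) from by simp [pvPrepH],
      pvTokens_cons, pvTokens_prepH_nil, List.append_assoc]
    simp only [pvTokens, List.map_cons, List.filter_cons]
    split <;> simp
  | case3 c r hne hb ih =>
    intro cur caps hd
    have hdr : ∀ c ∈ r, pvDomChar c = true := by
      intro x hx; exact hd x (by simp [hx])
    have hsep : (c = ',' ∨ c = '\n' ∨ c = '\r') := by
      rcases dom_isB c (hd c (by simp)) hb with h | h
      · exact Or.inr (Or.inl h)
      · exact Or.inr (Or.inr h)
    have e1 : pvScan (c :: r) cur caps = pvScan r [] (pvFlushTok cur caps) := by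
      simp [pvScan, hsep]
    rw [e1, ih [] (pvFlushTok cur caps) hdr, pvFlushTok_eq]
    have h2 : ([] :: pvLinesOf pvIsB r).flatMap pvSOC = [] :: ((pvLinesOf pvIsB r).flatMap pvSOC) := by
      simp [pvSOC]
    rw [h2, show pvPrepH cur ([] :: ((pvLinesOf pvIsB r).flatMap pvSOC)) =
        cur :: ((pvLinesOf pvIsB r).flatMap pvSOC) from by simp [pvPrepH],
      pvTokens_cons, pvTokens_prepH_nil, List.append_assoc]
    simp only [pvTokens, List.map_cons, List.filter_cons]
    split <;> simp
  | case4 c r hne hb ih =>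
    intro cur caps hd
    have hdr : ∀ c ∈ r, pvDomChar c = true := by
      intro x hx; exact hd x (by simp [hx])
    by_cases hc : c = ','
    · subst hc
      have e1 : pvScan (',' :: r) cur caps = pvScan r [] (pvFlushTok cur caps) := by
        simp [pvScan]
      rw [e1, ih [] (pvFlushTok cur caps) hdr, pvFlushTok_eq, flatMap_comma,
        pvTokens_prepH_nil, List.append_assoc]
    · have hn : c ≠ '\n' := by
        intro e; subst e; rw [isB_n] at hb; simp at hb
      have hr : c ≠ '\r' := by
        intro e; subst e; rw [isB_r] at hb; simp at hb
      have e1 : pvScan (c :: r) cur caps = pvScan r (cur ++ [c]) caps := by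
        simp [pvScan, hc, hn, hr]
      rw [e1, ih (cur ++ [c]) caps hdr, flatMap_consH c _ hc, prepH_consH]

theorem L_splitlines_str (s : String) :
    PySem.Str.splitlines s = (pvLinesOf pvIsB s.toList).map String.ofList := by
  rw [PySem.Str.splitlines]
  congr 1
  rw [PySem.Chars.splitlines]
  exact splitlines_eq _ _

theorem L_inner (ps : List (List Char)) : ∀ (caps : List String),
    (ps.map String.ofList).foldl
      (fun caps cap => let cap := PySem.Str.strip cap; if cap ≠ "" then caps ++ [cap] else caps) caps
    = caps ++ ((ps.map PySem.Chars.strip).filter (fun t => t ≠ [])).map String.ofList := by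
  induction ps with
  | nil => simp
  | cons p ps ih =>
    intro caps
    simp only [List.map_cons, List.foldl_cons]
    have hs : PySem.Str.strip (String.ofList p) = String.ofList (PySem.Chars.strip p) := by
      rw [PySem.Str.strip, String.toList_ofList]
    rw [hs]
    by_cases h : PySem.Chars.strip p = []
    · rw [if_neg (by simp [h])]
      rw [ih caps]
      congr 1
      simp only [List.filter_cons, h]
      simp
    · rw [if_pos (by simp [h])]
      rw [ih]
      simp only [List.filter_cons]
      rw [if_pos (by simpa using h)]
      simp

theorem L_outer (lines : List String) : ∀ (caps : List String),
    lines.foldl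
      (fun caps line =>
        ((PySem.Chars.splitOn line.toList [',']).map String.ofList).foldl
          (fun caps cap => let cap := PySem.Str.strip cap; if cap ≠ "" then caps ++ [cap] else caps)
          caps) caps
    = caps ++ lines.flatMap (fun line => pvTokens (pvSOC line.toList)) := by
  induction lines with
  | nil => simp
  | cons l ls ih =>
    intro caps
    simp only [List.foldl_cons, List.flatMap_cons]
    rw [L_inner, ih]
    have : ((((PySem.Chars.splitOn l.toList [',']).map PySem.Chars.strip).filter
        (fun t => t ≠ [])).map String.ofList) = pvTokens (pvSOC l.toList) := by
      rw [splitOn_comma_eq]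
      exact pvTokens_prepH_nil _
    rw [this, List.append_assoc]

theorem L_filterMap (ls : List String) :
    (ls.filterMap (fun l => if PySem.Str.strip l ≠ "" then some (PySem.Str.strip l) else none)).flatMap
        (fun line => pvTokens (pvSOC line.toList))
    = ls.flatMap (fun line => pvTokens (pvSOC line.toList)) := by
  induction ls with
  | nil => rfl
  | cons l ls ih =>
    by_cases h : PySem.Str.strip l = ""
    · have hf : (if PySem.Str.strip l ≠ "" then some (PySem.Str.strip l) else none) = none := by
        simp [h]
      rw [List.filterMap_cons, hf, ih, List.flatMap_cons]
      have hb : PySem.Chars.strip l.toList = [] := by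
        rw [← PySem.Str.toList_strip, h]
        rfl
      rw [pvTokens_pvSOC_blank _ hb]
      simp
    · have hf : (if PySem.Str.strip l ≠ "" then some (PySem.Str.strip l) else none) =
          some (PySem.Str.strip l) := by simp [h]
      rw [List.filterMap_cons, hf]
      simp only [List.flatMap_cons]
      rw [ih, show pvTokens (pvSOC (PySem.Str.strip l).toList) = pvTokens (pvSOC l.toList) from by
        rw [PySem.Str.toList_strip, pvTokens_pvSOC_strip]]

theorem L_linesflat (ls : List (List Char)) :
    ls.flatMap (fun x => pvTokens (pvSOC x)) = pvTokens (ls.flatMap pvSOC) := by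
  induction ls with
  | nil => rfl
  | cons x xs ih => simp only [List.flatMap_cons, pvTokens_append, ih]

theorem a_normal (raw : Option String) :
    split_caps_py raw = pvTokens ((pvLinesOf pvIsB (raw.getD "").toList).flatMap pvSOC) := by
  unfold split_caps_py pvParseLines
  rw [L_outer, L_filterMap, L_splitlines_str, List.flatMap_map]
  simp only [Function.comp, String.toList_ofList, List.nil_append]
  rw [← L_linesflat]

-- ===== VERDICT (by name: the statement is the Claim_ definition above) =====
theorem split_caps_py_spec : Claim_equal_split_caps_py := by
  intro raw hdom
  unfold Spec_split_caps_py split_caps_py_alt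
  have hd : ∀ c ∈ (raw.getD "").toList, pvDomChar c = true := by
    intro c hc
    cases raw with
    | none => simp at hc
    | some s =>
      simp only [Option.getD] at hc
      simp only [Dom_split_caps_py, Option.map, Option.getD, pvDomStr, List.all_eq_true] at hdom
      exact hdom c hc
  rw [a_normal, main_scan _ [] [] hd, pvTokens_prepH_nil]
  simp
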